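-- pv_equiv track=rewrite | github.com/dshipley71/GEOEventFusion | geoeventfusion/agents/fusion_agent.py | _same_event_category
-- ===== SOURCE A (Python) =====
-- def _same_event_category(type_a: str, type_b: str) -> bool:
--     """Check whether two event types belong to the same broad category.
--
--     Args:
--         type_a: First event type string.
--         type_b: Second event type string.
--
--     Returns:
--         True if both types fall under the same broad category.
--     """
--     _CONFLICT_TYPES = {"CONFLICT", "MILITARY_ESCALATION", "MARITIME", "CYBER"}
--     _POLITICAL_TYPES = {"DIPLOMATIC", "POLITICAL_INSTABILITY", "ELECTIONS_AND_VOTING"}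
--     _HUMANITARIAN_TYPES = {"HUMANITARIAN", "ECONOMIC", "SANCTIONS"}
--     for category in [_CONFLICT_TYPES, _POLITICAL_TYPES, _HUMANITARIAN_TYPES]:
--         if type_a in category and type_b in category:
--             return True
--     return False
-- ===== SOURCE B (Python) =====
-- # B: one flat dict from event type to category label; two O(1) lookups replace the loop over three sets.
-- _CATEGORY = {
--     "CONFLICT": "conflict",
--     "MILITARY_ESCALATION": "conflict",
--     "MARITIME": "conflict",
--     "CYBER": "conflict",
--     "DIPLOMATIC": "political",
--     "POLITICAL_INSTABILITY": "political",
--     "ELECTIONS_AND_VOTING": "political",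
--     "HUMANITARIAN": "humanitarian",
--     "ECONOMIC": "humanitarian",
--     "SANCTIONS": "humanitarian",
-- }
--
-- def _same_event_category(type_a: str, type_b: str) -> bool:
--     ca = _CATEGORY.get(type_a)
--     return ca is not None and ca == _CATEGORY.get(type_b)
-- ===== Notes on version B (the rewrite author's own statement) =====
-- stated objective: simpler
-- what changed: Replaces the loop over three sets with a single precomputed type->category dict and two lookups compared for equality (guarding None for unknown types).
import Mathlib
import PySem

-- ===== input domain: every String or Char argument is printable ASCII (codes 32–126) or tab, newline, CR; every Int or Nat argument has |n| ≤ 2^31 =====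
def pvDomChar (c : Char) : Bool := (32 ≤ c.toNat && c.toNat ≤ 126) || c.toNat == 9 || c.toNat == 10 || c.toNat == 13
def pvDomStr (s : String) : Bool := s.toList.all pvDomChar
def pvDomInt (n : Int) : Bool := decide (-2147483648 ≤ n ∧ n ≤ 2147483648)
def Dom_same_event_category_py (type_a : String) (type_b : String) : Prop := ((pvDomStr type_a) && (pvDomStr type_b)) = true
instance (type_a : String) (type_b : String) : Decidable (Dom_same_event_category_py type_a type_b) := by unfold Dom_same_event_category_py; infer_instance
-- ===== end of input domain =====

-- B replaces A's loop over three category sets with one flat type->category dict and two lookups (simpler decomposition).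


-- ===== PORT A =====
-- the three category sets, as in A
def pvConflictTypes : PySem.Set String :=
  PySem.Set.ofList ["CONFLICT", "MILITARY_ESCALATION", "MARITIME", "CYBER"]
def pvPoliticalTypes : PySem.Set String :=
  PySem.Set.ofList ["DIPLOMATIC", "POLITICAL_INSTABILITY", "ELECTIONS_AND_VOTING"]
def pvHumanitarianTypes : PySem.Set String :=
  PySem.Set.ofList ["HUMANITARIAN", "ECONOMIC", "SANCTIONS"]

-- the 'for category in [...]: if type_a in category and type_b in category: return True' loop
def pvCatLoop (type_a : String) (type_b : String) : List (PySem.Set String) → Bool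
  | [] => false
  | c :: rest =>
    if PySem.Set.contains c type_a && PySem.Set.contains c type_b then true
    else pvCatLoop type_a type_b rest

def same_event_category_py (type_a : String) (type_b : String) : Bool :=
  pvCatLoop type_a type_b [pvConflictTypes, pvPoliticalTypes, pvHumanitarianTypes]

-- ===== PORT B =====
-- the flat type->category dict of Source B (a dict literal with distinct keys, in source order)
def pvCategoryDict : PySem.Dict String String :=
  PySem.Dict.mk
    [("CONFLICT", "conflict"), ("MILITARY_ESCALATION", "conflict"),
     ("MARITIME", "conflict"), ("CYBER", "conflict"),
     ("DIPLOMATIC", "political"), ("POLITICAL_INSTABILITY", "political"),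
     ("ELECTIONS_AND_VOTING", "political"),
     ("HUMANITARIAN", "humanitarian"), ("ECONOMIC", "humanitarian"),
     ("SANCTIONS", "humanitarian")]

-- ca = _CATEGORY.get(type_a); return ca is not None and ca == _CATEGORY.get(type_b)
def same_event_category_py_alt (type_a : String) (type_b : String) : Bool :=
  match PySem.Dict.get? pvCategoryDict type_a with
  | none => false
  | some ca => decide (some ca = PySem.Dict.get? pvCategoryDict type_b)

-- ===== PRECONDITION & SPEC =====
def Spec_same_event_category_py (type_a : String) (type_b : String) (out : Bool) : Prop := out = same_event_category_py_alt type_a type_b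
instance (type_a : String) (type_b : String) (out : Bool) : Decidable (Spec_same_event_category_py type_a type_b out) := by unfold Spec_same_event_category_py; infer_instance

-- ===== CLAIM (what is proved, stated in full; the proofs are below) =====
def Claim_equal_same_event_category_py : Prop := ∀ (type_a : String) (type_b : String), Dom_same_event_category_py type_a type_b → Spec_same_event_category_py type_a type_b (same_event_category_py type_a type_b)

-- ===== LEMMAS AND PROOFS =====

-- the joint profile of one string against the three sets and the dict: only four shapes are possible
def pvQuad (s : String) : Bool × Bool × Bool × Option String :=
  (PySem.Set.contains pvConflictTypes s, PySem.Set.contains pvPoliticalTypes s,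
   PySem.Set.contains pvHumanitarianTypes s, PySem.Dict.get? pvCategoryDict s)

lemma pvQuad_cases (s : String) :
    pvQuad s = (true, false, false, some "conflict") ∨
    pvQuad s = (false, true, false, some "political") ∨
    pvQuad s = (false, false, true, some "humanitarian") ∨
    pvQuad s = (false, false, false, none) := by
  by_cases h1 : s = "CONFLICT"; · subst h1; decide
  by_cases h2 : s = "MILITARY_ESCALATION"; · subst h2; decide
  by_cases h3 : s = "MARITIME"; · subst h3; decide
  by_cases h4 : s = "CYBER"; · subst h4; decide
  by_cases h5 : s = "DIPLOMATIC"; · subst h5; decide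
  by_cases h6 : s = "POLITICAL_INSTABILITY"; · subst h6; decide
  by_cases h7 : s = "ELECTIONS_AND_VOTING"; · subst h7; decide
  by_cases h8 : s = "HUMANITARIAN"; · subst h8; decide
  by_cases h9 : s = "ECONOMIC"; · subst h9; decide
  by_cases h10 : s = "SANCTIONS"; · subst h10; decide
  right; right; right
  simp [pvQuad, pvConflictTypes, pvPoliticalTypes, pvHumanitarianTypes, pvCategoryDict,
    PySem.Set.ofList, PySem.Set.add, PySem.Set.contains, PySem.Dict.get?,
    h1, h2, h3, h4, h5, h6, h7, h8, h9, h10,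
    Ne.symm h1, Ne.symm h2, Ne.symm h3, Ne.symm h4, Ne.symm h5,
    Ne.symm h6, Ne.symm h7, Ne.symm h8, Ne.symm h9, Ne.symm h10]

-- ===== VERDICT (by name: the statement is the Claim_ definition above) =====
theorem same_event_category_py_spec : Claim_equal_same_event_category_py := by
  intro a b _
  unfold Spec_same_event_category_py
  have ha := pvQuad_cases a
  have hb := pvQuad_cases b
  simp only [pvQuad, Prod.mk.injEq] at ha hb
  simp only [same_event_category_py, same_event_category_py_alt, pvCatLoop]
  rcases ha with ⟨a1, a2, a3, a4⟩ | ⟨a1, a2, a3, a4⟩ | ⟨a1, a2, a3, a4⟩ | ⟨a1, a2, a3, a4⟩ <;>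
    rcases hb with ⟨b1, b2, b3, b4⟩ | ⟨b1, b2, b3, b4⟩ | ⟨b1, b2, b3, b4⟩ | ⟨b1, b2, b3, b4⟩ <;>
    simp_all
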